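-- pv_equiv track=rewrite | github.com/kwalker314/advent-of-code | 2019/day04/day04a.py | meets_criteria
-- ===== SOURCE A (Python) =====
-- def meets_criteria(num):
--     digits = [int(i) for i in str(num)]
--     has_double = False
--     for i in range(1, len(digits)):
--         if digits[i-1] > digits[i]:
--             return False
--         if digits[i-1] == digits[i]:
--             has_double = True
--
--     return has_double
-- ===== SOURCE B (Python) =====
-- def meets_criteria(num):
--     digits = [int(i) for i in str(num)]
--     return digits == sorted(digits) and any(a == b for a, b in zip(digits, digits[1:]))
-- ===== Notes on version B (the rewrite author's own statement) =====
-- stated objective: idiomatic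
-- what changed: A's single fused early-exit index loop carrying a has_double flag is replaced by two independent whole-list checks: compare the digit list with its sorted copy (monotone test) and scan adjacent pairs via zip for a double, combined with 'and'.
import Mathlib
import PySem

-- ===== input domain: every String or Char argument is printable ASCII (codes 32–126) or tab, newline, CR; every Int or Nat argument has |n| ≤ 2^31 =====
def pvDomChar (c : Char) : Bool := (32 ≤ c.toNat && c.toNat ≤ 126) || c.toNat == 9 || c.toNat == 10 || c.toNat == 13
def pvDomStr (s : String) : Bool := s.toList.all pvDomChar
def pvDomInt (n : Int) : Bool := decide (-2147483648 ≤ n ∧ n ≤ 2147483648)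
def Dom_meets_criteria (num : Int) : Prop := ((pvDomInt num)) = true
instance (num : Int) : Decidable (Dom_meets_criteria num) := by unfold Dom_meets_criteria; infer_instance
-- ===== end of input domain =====

-- B changes the decomposition (two independent whole-list checks instead of A's fused early-exit loop); objective: idiomatic.

-- ===== PORT A =====
-- digits = [int(i) for i in str(num)]  (shared by both Pythons verbatim; int('-') = none, defaulted to 0,
-- is unreachable under Pre_meets_criteria, which requires 0 ≤ num)
def pyDigits (num : Int) : List Int :=
  (PySem.Int.toChars num).map (fun c => (PySem.Int.ofChars? [c]).getD 0)

-- the for-loop over range(1, len(digits)) with early return, as structural recursion on the tail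
def loopA : List Int → Int → Bool → Bool
  | [], _, has_double => has_double
  | d :: rest, prev, has_double =>
    if prev > d then false
    else if prev = d then loopA rest d true
    else loopA rest d has_double

def meets_criteria (num : Int) : Bool :=
  match pyDigits num with
  | [] => false
  | d0 :: rest => loopA rest d0 false

-- ===== PORT B =====
def adjEq (ds : List Int) : Bool := (ds.zip (ds.drop 1)).any (fun p => p.1 == p.2)

def meets_criteria_alt (num : Int) : Bool :=
  let digits := pyDigits num
  decide (digits = PySem.List.sorted digits id false) && adjEq digits

-- ===== PRECONDITION & SPEC =====
-- Pre_ excludes exactly the negative inputs, on which A raises ValueError (int('-')).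
def Pre_meets_criteria (num : Int) : Prop := 0 ≤ num
instance (num : Int) : Decidable (Pre_meets_criteria num) := by unfold Pre_meets_criteria; infer_instance
def pvWitness_meets_criteria : Int := (111122)

def Spec_meets_criteria (num : Int) (out : Bool) : Prop := out = meets_criteria_alt num
instance (num : Int) (out : Bool) : Decidable (Spec_meets_criteria num out) := by unfold Spec_meets_criteria; infer_instance

-- ===== CLAIM (what is proved, stated in full; the proofs are below) =====
def Claim_equal_meets_criteria : Prop := ∀ (num : Int), Dom_meets_criteria num → Pre_meets_criteria num → Spec_meets_criteria num (meets_criteria num)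

-- ===== LEMMAS AND PROOFS =====

lemma adjEq_cons (a b : Int) (rest : List Int) :
    adjEq (a :: b :: rest) = ((a == b) || adjEq (b :: rest)) := by
  simp [adjEq]

lemma loopA_eq (rest : List Int) : ∀ (prev : Int) (hd : Bool),
    loopA rest prev hd =
      (decide (List.IsChain (· ≤ ·) (prev :: rest)) && (hd || adjEq (prev :: rest))) := by
  induction rest with
  | nil => intro prev hd; simp [loopA, adjEq]
  | cons d rest ih =>
    intro prev hd
    rw [adjEq_cons]
    by_cases h1 : prev > d
    · have hnc : ¬ List.IsChain (· ≤ ·) (prev :: d :: rest) := by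
        rw [List.isChain_cons_cons]
        rintro ⟨hle, -⟩
        omega
      simp [loopA, h1, hnc]
    · have hle : prev ≤ d := by omega
      by_cases h2 : prev = d
      · subst h2
        simp [loopA, ih, List.isChain_cons_cons]
      · simp [loopA, h1, h2, ih, List.isChain_cons_cons, hle]
        rw [show (prev == d) = false from by simp [h2]]
        simp

lemma sorted_eq_iff_chain (ds : List Int) :
    (ds = PySem.List.sorted ds id false) ↔ List.IsChain (· ≤ ·) ds := by
  constructor
  · intro h
    rw [List.isChain_iff_pairwise]
    have := PySem.List.sorted_pairwise ds id
    rw [← h] at this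
    simpa using this
  · intro h
    rw [List.isChain_iff_pairwise] at h
    exact (PySem.List.sorted_eq_self_of_pairwise ds id (by simpa using h)).symm

-- ===== VERDICT (by name: the statement is the Claim_ definition above) =====
theorem meets_criteria_spec : Claim_equal_meets_criteria := by
  intro num _ _
  unfold Spec_meets_criteria meets_criteria meets_criteria_alt
  rcases h : pyDigits num with _ | ⟨d0, rest⟩
  · simp [adjEq]
  · simp only [loopA_eq, sorted_eq_iff_chain, Bool.false_or]
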